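-- pv_equiv track=rewrite | github.com/GrinRus/ai_driven_dev | aidd_runtime/cli.py | _extract_handoff_block
-- ===== SOURCE A (Python) =====
-- from typing import Any, Dict, Iterable, List, Optional, Sequence, Tuple
--
-- def _extract_handoff_block(lines: List[str], source: str) -> tuple[int, int, List[str]]:
--     start = -1
--     end = -1
--     marker = f"handoff:{source}"
--     for idx, line in enumerate(lines):
--         lowered = line.lower()
--         if marker in lowered and "start" in lowered:
--             start = idx
--             break
--     if start != -1:
--         for idx in range(start + 1, len(lines)):
--             lowered = lines[idx].lower()
--             if marker in lowered and "end" in lowered: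
--                 end = idx
--                 break
--     if start != -1 and end == -1:
--         end = start
--     existing: List[str] = []
--     if start != -1 and end != -1:
--         existing = [
--             line
--             for line in lines[start + 1 : end]
--             if line.strip().startswith("- [ ]")
--         ]
--     return start, end, existing
-- ===== SOURCE B (Python) =====
-- def _extract_handoff_block(lines, source):
--     marker = f"handoff:{source}"
--     start = -1
--     end = -1
--     existing = []
--     collecting = False
--     for idx, line in enumerate(lines):
--         lowered = line.lower()
--         if collecting:
--             if marker in lowered and "end" in lowered:
--                 end = idx
--                 break
--             if line.strip().startswith("- [ ]"):
--                 existing.append(line)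
--         elif marker in lowered and "start" in lowered:
--             start = idx
--             collecting = True
--     if start != -1 and end == -1:
--         end = start
--         existing = []
--     return start, end, existing
-- ===== Notes on version B (the rewrite author's own statement) =====
-- stated objective: alternative
-- what changed: Replaces A's two sequential index scans plus a slice-and-filter comprehension with one single pass over the lines driven by a collecting flag that records the start, gathers checklist lines as it goes, and stops at the end marker.
import Mathlib
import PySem

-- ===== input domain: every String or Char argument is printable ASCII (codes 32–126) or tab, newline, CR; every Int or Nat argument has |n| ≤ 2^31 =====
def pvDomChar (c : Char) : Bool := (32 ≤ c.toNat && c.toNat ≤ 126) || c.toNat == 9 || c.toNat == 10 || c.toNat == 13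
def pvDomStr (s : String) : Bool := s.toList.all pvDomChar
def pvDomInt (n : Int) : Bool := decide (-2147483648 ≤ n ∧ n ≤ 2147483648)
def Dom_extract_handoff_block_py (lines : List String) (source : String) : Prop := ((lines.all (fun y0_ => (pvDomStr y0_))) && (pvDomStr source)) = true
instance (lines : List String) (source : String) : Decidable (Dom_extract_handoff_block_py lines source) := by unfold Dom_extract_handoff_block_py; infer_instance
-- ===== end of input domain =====

-- B replaces A's two sequential index scans plus a slice-and-filter with one single pass
-- driven by a collecting flag (objective: alternative decomposition, same cost).


-- shared condition helpers: both Pythons contain literally these same tests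
def pvStartHit (marker : List Char) (line : String) : Bool :=
  let lowered := PySem.Chars.lower line.toList
  PySem.Chars.isIn marker lowered && PySem.Chars.isIn "start".toList lowered

def pvEndHit (marker : List Char) (line : String) : Bool :=
  let lowered := PySem.Chars.lower line.toList
  PySem.Chars.isIn marker lowered && PySem.Chars.isIn "end".toList lowered

def pvChecklist (line : String) : Bool :=
  PySem.Chars.startswith (PySem.Chars.strip line.toList) "- [ ]".toList

-- ===== PORT A =====
-- first loop of A: scan for the start marker, returning its index or -1
def pvAFindStart (marker : List Char) : List String → Int → Int
  | [], _ => -1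
  | l :: rest, idx => if pvStartHit marker l then idx else pvAFindStart marker rest (idx + 1)

-- second loop of A: scan the index range for the end marker ('' default never used: indices are in range)
def pvAFindEnd (marker : List Char) (lines : List String) : List Int → Int
  | [] => -1
  | idx :: rest =>
      if pvEndHit marker (PySem.List.pyGetD lines idx "") then idx
      else pvAFindEnd marker lines rest

def extract_handoff_block_py (lines : List String) (source : String) : Int × Int × List String :=
  let marker := "handoff:".toList ++ source.toList
  let start := pvAFindStart marker lines 0
  let end1 := if start != -1 then pvAFindEnd marker lines (PySem.List.pyRange (start + 1) lines.length 1) else -1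
  let end2 := if start != -1 && end1 == -1 then start else end1
  let existing := if start != -1 && end2 != -1 then
      (PySem.List.slice lines (some (start + 1)) (some end2)).filter pvChecklist
    else []
  (start, end2, existing)

-- ===== PORT B =====
-- single pass with a collecting flag; returns (start, end-or-(-1), collected checklist lines)
def pvBLoop (marker : List Char) : List String → Int → Bool → Int → List String → Int × Int × List String
  | [], _, _, start, acc => (start, -1, acc)
  | l :: rest, idx, collecting, start, acc =>
      if collecting then
        if pvEndHit marker l then (start, idx, acc)
        else pvBLoop marker rest (idx + 1) true start (if pvChecklist l then acc ++ [l] else acc)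
      else
        if pvStartHit marker l then pvBLoop marker rest (idx + 1) true idx acc
        else pvBLoop marker rest (idx + 1) false start acc

def extract_handoff_block_py_alt (lines : List String) (source : String) : Int × Int × List String :=
  let marker := "handoff:".toList ++ source.toList
  match pvBLoop marker lines 0 false (-1) [] with
  | (start, e, acc) => if start != -1 && e == -1 then (start, start, []) else (start, e, acc)

-- ===== PRECONDITION & SPEC =====
def Spec_extract_handoff_block_py (lines : List String) (source : String) (out : Int × Int × List String) : Prop := out = extract_handoff_block_py_alt lines source
instance (lines : List String) (source : String) (out : Int × Int × List String) : Decidable (Spec_extract_handoff_block_py lines source out) := by unfold Spec_extract_handoff_block_py; infer_instance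

-- ===== CLAIM (what is proved, stated in full; the proofs are below) =====
def Claim_equal_extract_handoff_block_py : Prop := ∀ (lines : List String) (source : String), Dom_extract_handoff_block_py lines source → Spec_extract_handoff_block_py lines source (extract_handoff_block_py lines source)

-- ===== LEMMAS AND PROOFS =====

-- reference scans used only by the proofs
def pvScanE (marker : List Char) : List String → Int → Int
  | [], _ => -1
  | l :: rest, idx => if pvEndHit marker l then idx else pvScanE marker rest (idx + 1)

def pvPreEnd (marker : List Char) : List String → List String
  | [] => []
  | l :: rest => if pvEndHit marker l then []
      else (if pvChecklist l then [l] else []) ++ pvPreEnd marker rest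

def pvSplitS (marker : List Char) : List String → Int → Option (Int × List String)
  | [], _ => none
  | l :: rest, idx => if pvStartHit marker l then some (idx, rest) else pvSplitS marker rest (idx + 1)

-- B's collecting phase computes pvScanE / pvPreEnd
theorem pvBLoop_collect (marker : List Char) (rest : List String) :
    ∀ (idx start : Int) (acc : List String),
    pvBLoop marker rest idx true start acc =
      (start, pvScanE marker rest idx, acc ++ pvPreEnd marker rest) := by
  induction rest with
  | nil => intro idx start acc; simp [pvBLoop, pvScanE, pvPreEnd]
  | cons l ls ih =>
      intro idx start acc
      by_cases he : pvEndHit marker l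
      · simp [pvBLoop, pvScanE, pvPreEnd, he]
      · by_cases hc : pvChecklist l <;>
          simp [pvBLoop, pvScanE, pvPreEnd, he, hc, ih]

-- B's searching phase splits at the first start hit
theorem pvBLoop_search (marker : List Char) (rest : List String) :
    ∀ (idx : Int),
    pvBLoop marker rest idx false (-1) [] =
      match pvSplitS marker rest idx with
      | none => (-1, -1, [])
      | some (j, suffix) => (j, pvScanE marker suffix (j + 1), pvPreEnd marker suffix) := by
  induction rest with
  | nil => intro idx; simp [pvBLoop, pvSplitS]
  | cons l ls ih =>
      intro idx
      by_cases hs : pvStartHit marker l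
      · simp [pvBLoop, pvSplitS, hs, pvBLoop_collect]
      · simp [pvBLoop, pvSplitS, hs, ih]

-- A's first loop returns the index component of pvSplitS
theorem pvAFindStart_eq (marker : List Char) (rest : List String) :
    ∀ (idx : Int),
    pvAFindStart marker rest idx =
      match pvSplitS marker rest idx with
      | none => -1
      | some (j, _) => j := by
  induction rest with
  | nil => intro idx; simp [pvAFindStart, pvSplitS]
  | cons l ls ih =>
      intro idx
      by_cases hs : pvStartHit marker l
      · simp [pvAFindStart, pvSplitS, hs]
      · simp [pvAFindStart, pvSplitS, hs, ih]

-- the shape of a successful pvSplitS on the whole list at a Nat offset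
theorem pvSplitS_some (marker : List Char) (rest : List String) :
    ∀ (i : Nat) (j : Int) (suffix : List String),
    pvSplitS marker rest (i : Int) = some (j, suffix) →
    ∃ k : Nat, i ≤ k ∧ j = (k : Int) ∧ k - i < rest.length ∧ suffix = rest.drop (k - i + 1) := by
  induction rest with
  | nil => intro i j suffix h; simp [pvSplitS] at h
  | cons l ls ih =>
      intro i j suffix h
      by_cases hs : pvStartHit marker l
      · simp [pvSplitS, hs] at h
        exact ⟨i, le_refl i, h.1.symm, by simp, by simp [h.2]⟩
      · simp [pvSplitS, hs] at h
        have h' : pvSplitS marker ls ((i + 1 : Nat) : Int) = some (j, suffix) := by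
          push_cast; exact_mod_cast h
        obtain ⟨k, hk1, hk2, hk3, hk4⟩ := ih (i + 1) j suffix h'
        refine ⟨k, by omega, hk2, by simp only [List.length_cons]; omega, ?_⟩
        rw [hk4]
        have : k - i + 1 = (k - (i + 1) + 1) + 1 := by omega
        simp [this]

-- A's range loop over indices equals the structural scan over the dropped suffix
theorem pvAFindEnd_eq (marker : List Char) (lines : List String) :
    ∀ (i : Nat), i ≤ lines.length →
    pvAFindEnd marker lines (PySem.List.pyRange (i : Int) lines.length 1) =
      pvScanE marker (lines.drop i) i := by
  intro i hi
  induction hfuel : lines.length - i generalizing i with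
  | zero =>
      have hlen : i = lines.length := by omega
      rw [PySem.List.pyRange_one_eq_nil (by exact_mod_cast le_of_eq hlen.symm)]
      rw [List.drop_eq_nil_of_le (le_of_eq hlen.symm)]
      simp [pvAFindEnd, pvScanE]
  | succ n ih =>
      have hlt : i < lines.length := by omega
      rw [PySem.List.pyRange_one_cons (by exact_mod_cast hlt)]
      rw [List.drop_eq_getElem_cons hlt]
      have hget : PySem.List.pyGetD lines (i : Int) "" = lines[i] := by
        simp [PySem.List.pyGetD_natCast, List.getD_eq_getElem?_getD, List.getElem?_eq_getElem hlt]
      by_cases he : pvEndHit marker lines[i]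
      · simp [pvAFindEnd, pvScanE, hget, he]
      · have hcast : ((i : Int) + 1) = ((i + 1 : Nat) : Int) := by push_cast; ring
        simp only [pvAFindEnd, pvScanE, hget, he, Bool.false_eq_true, ite_false]
        rw [hcast, ih (i + 1) (by omega) (by omega)]

-- a successful pvScanE lands at a Nat index past its offset, with pvPreEnd the filtered prefix
theorem pvScanE_some (marker : List Char) (suffix : List String) :
    ∀ (i : Nat), pvScanE marker suffix (i : Int) ≠ -1 →
    ∃ m : Nat, pvScanE marker suffix (i : Int) = ((i + m : Nat) : Int) ∧ m < suffix.length ∧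
      pvPreEnd marker suffix = (suffix.take m).filter pvChecklist := by
  induction suffix with
  | nil => intro i h; simp [pvScanE] at h
  | cons l ls ih =>
      intro i h
      by_cases he : pvEndHit marker l
      · exact ⟨0, by simp [pvScanE, he], by simp, by simp [pvPreEnd, he]⟩
      · have hcast : ((i : Int) + 1) = ((i + 1 : Nat) : Int) := by push_cast; ring
        simp only [pvScanE, he, Bool.false_eq_true, ite_false] at h ⊢
        rw [hcast] at h ⊢
        obtain ⟨m, hm1, hm2, hm3⟩ := ih (i + 1) h
        refine ⟨m + 1, ?_, by simp only [List.length_cons]; omega, ?_⟩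
        · rw [hm1]; push_cast; ring
        · simp [pvPreEnd, he, hm3, List.filter_cons]
          by_cases hc : pvChecklist l <;> simp [hc]

theorem pvScanE_ge (marker : List Char) (suffix : List String) :
    ∀ (i : Nat), pvScanE marker suffix (i : Int) = -1 ∨ (i : Int) ≤ pvScanE marker suffix (i : Int) := by
  induction suffix with
  | nil => intro i; left; simp [pvScanE]
  | cons l ls ih =>
      intro i
      by_cases he : pvEndHit marker l
      · right; simp [pvScanE, he]
      · have hcast : ((i : Int) + 1) = ((i + 1 : Nat) : Int) := by push_cast; ring
        simp only [pvScanE, he, Bool.false_eq_true, ite_false, hcast]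
        rcases ih (i + 1) with h | h
        · left; exact h
        · right; omega

-- ===== VERDICT (by name: the statement is the Claim_ definition above) =====
theorem extract_handoff_block_py_spec : Claim_equal_extract_handoff_block_py := by
  intro lines source _
  unfold Spec_extract_handoff_block_py extract_handoff_block_py extract_handoff_block_py_alt
  set marker := "handoff:".toList ++ source.toList with hmk
  simp only [pvBLoop_search, pvAFindStart_eq]
  rcases hsplit : pvSplitS marker lines 0 with _ | ⟨j, suffix⟩
  · simp
  · have h0 : pvSplitS marker lines ((0 : Nat) : Int) = some (j, suffix) := by
      exact_mod_cast hsplit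
    obtain ⟨k, -, hjk, hklen, hsuf⟩ := pvSplitS_some marker lines 0 j suffix h0
    simp only [Nat.sub_zero] at hklen hsuf
    subst hjk hsuf
    have hkne : ((k : Int) != -1) = true := by simp
    have hc1 : ((k : Int) + 1) = ((k + 1 : Nat) : Int) := by push_cast; ring
    have hke : pvAFindEnd marker lines (PySem.List.pyRange ((k : Int) + 1) lines.length 1)
        = pvScanE marker (lines.drop (k + 1)) ((k + 1 : Nat) : Int) := by
      rw [hc1, pvAFindEnd_eq marker lines (k + 1) (by omega)]
    rcases pvScanE_ge marker (lines.drop (k + 1)) (k + 1) with hneg | hpos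
    · -- no end marker after the start: both sides yield (k, k, [])
      have hslice : PySem.List.slice lines (some ((k : Int) + 1)) (some (k : Int)) = [] := by
        rw [hc1, PySem.List.slice_natCast]
        simp
      push_cast at hneg hke hslice ⊢
      simp [hkne, hke, hneg, hslice]
    · -- an end marker exists at index k + 1 + m
      have hne : pvScanE marker (lines.drop (k + 1)) ((k + 1 : Nat) : Int) ≠ -1 := by omega
      obtain ⟨m, hm1, hm2, hm3⟩ := pvScanE_some marker (lines.drop (k + 1)) (k + 1) hne
      have hslice : PySem.List.slice lines (some ((k : Int) + 1)) (some ((k + 1 + m : Nat) : Int))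
          = (lines.drop (k + 1)).take m := by
        rw [hc1, PySem.List.slice_natCast]
        congr 1
        omega
      push_cast at hm1 hke hslice hm3 ⊢
      have hnne : ¬((k : Int) + 1 + (m : Int) = -1) := by omega
      simp [hkne, hke, hm1, hnne, hslice, hm3]
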